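-- pv_equiv track=rewrite | github.com/yunea/ca-feu | feu00.py | center_line
-- ===== SOURCE A (Python) =====
-- def center_line(arg) :
--   i = 0
--   match arg :
--     case 1 :
--       return "|"
--     case 2 :
--       return "||"
--     case _ :
--       s = "|"
--       while i < arg-2 :
--         s += " "
--         i += 1
--       s += "|"
--       return s
-- ===== SOURCE B (Python) =====
-- def center_line(arg):
--     if arg == 1:
--         return "|"
--     return "|" + " " * max(0, arg - 2) + "|"
-- ===== Notes on version B (the rewrite author's own statement) =====
-- stated objective: simpler
-- what changed: Replaces the while-loop character-by-character string accumulation with a closed-form string multiplication of the space count.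
import Mathlib
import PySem

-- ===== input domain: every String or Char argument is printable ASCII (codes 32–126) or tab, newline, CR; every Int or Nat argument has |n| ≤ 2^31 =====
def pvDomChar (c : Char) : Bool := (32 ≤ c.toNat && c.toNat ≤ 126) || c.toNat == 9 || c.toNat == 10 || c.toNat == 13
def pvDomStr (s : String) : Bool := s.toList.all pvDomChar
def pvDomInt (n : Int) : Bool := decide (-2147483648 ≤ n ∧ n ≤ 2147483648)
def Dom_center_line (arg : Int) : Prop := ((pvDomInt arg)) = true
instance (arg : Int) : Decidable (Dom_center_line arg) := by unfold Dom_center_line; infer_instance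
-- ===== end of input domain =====

-- B replaces A's while-loop string accumulation with a closed-form space-repetition; objective: simpler.

-- ===== PORT A =====
-- the while loop `while i < arg-2: s += " "; i += 1`, state (i, s)
def center_line_loop (arg : Int) (i : Int) (s : String) : String :=
  if h : i < arg - 2 then
    center_line_loop arg (i + 1) (s ++ " ")
  else
    s
termination_by (arg - 2 - i).toNat
decreasing_by
  have : arg - 2 - (i + 1) < arg - 2 - i := by omega
  omega

def center_line (arg : Int) : String :=
  if arg = 1 then "|"
  else if arg = 2 then "||"
  else (center_line_loop arg 0 "|") ++ "|"

-- ===== PORT B =====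
def center_line_alt (arg : Int) : String :=
  if arg = 1 then "|"
  else "|" ++ String.ofList (List.replicate (max 0 (arg - 2)).toNat ' ') ++ "|"

-- ===== PRECONDITION & SPEC =====
def Spec_center_line (arg : Int) (out : String) : Prop := out = center_line_alt arg
instance (arg : Int) (out : String) : Decidable (Spec_center_line arg out) := by unfold Spec_center_line; infer_instance

-- ===== CLAIM (what is proved, stated in full; the proofs are below) =====
def Claim_equal_center_line : Prop := ∀ (arg : Int), Dom_center_line arg → Spec_center_line arg (center_line arg)

-- ===== LEMMAS AND PROOFS =====

theorem center_line_loop_eq (arg i : Int) (s : String) :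
    center_line_loop arg i s = s ++ String.ofList (List.replicate (arg - 2 - i).toNat ' ') := by
  generalize hn : (arg - 2 - i).toNat = n
  induction n generalizing i s with
  | zero =>
      rw [center_line_loop, dif_neg (by omega)]
      apply String.ext; simp
  | succ n ih =>
      rw [center_line_loop, dif_pos (by omega), ih _ _ (by omega)]
      apply String.ext
      simp [List.replicate_succ]

-- ===== VERDICT (by name: the statement is the Claim_ definition above) =====
theorem center_line_spec : Claim_equal_center_line := by
  intro arg _
  unfold Spec_center_line center_line center_line_alt
  split_ifs with h1 h2
  · rfl
  · subst h2
    decide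
  · rw [center_line_loop_eq]
    have h3 : (arg - 2 - 0).toNat = (max 0 (arg - 2)).toNat := by omega
    rw [h3]
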